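-- pv_equiv track=rewrite | github.com/sukhbinder/kon | src/kon/tools/_tool_utils.py | truncate_lines_by_bytes
-- ===== SOURCE A (Python) =====
-- def truncate_lines_by_bytes(
--     lines: list[str], max_output_bytes: int, marker: str = "[output truncated]"
-- ) -> tuple[str, bool]:
--     total_bytes = 0
--     result_lines: list[str] = []
--
--     for line in lines:
--         line_bytes = len(line.encode("utf-8"))
--         if total_bytes + line_bytes <= max_output_bytes:
--             total_bytes += line_bytes
--             result_lines.append(line)
--         else:
--             result_lines.append(marker)
--             return "\n".join(result_lines), True
--
--     return "\n".join(result_lines), False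
-- ===== SOURCE B (Python) =====
-- def truncate_lines_by_bytes(
--     lines: list[str], max_output_bytes: int, marker: str = "[output truncated]"
-- ) -> tuple[str, bool]:
--     # Stage 1: prefix sums of the lines' UTF-8 byte lengths (a nondecreasing array).
--     prefix = []
--     total = 0
--     for line in lines:
--         total += len(line.encode("utf-8"))
--         prefix.append(total)
--     # Stage 2: binary search (bisect_right by hand; bytes lengths are >= 0, so
--     # prefix is sorted): k = number of prefix sums <= the byte budget.
--     lo, hi = 0, len(prefix)
--     while lo < hi:
--         mid = (lo + hi) // 2
--         if prefix[mid] <= max_output_bytes: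
--             lo = mid + 1
--         else:
--             hi = mid
--     k = lo
--     # Stage 3: build the output once from the cutoff index.
--     if k == len(lines):
--         return "\n".join(lines), False
--     return "\n".join(lines[:k] + [marker]), True
-- ===== Notes on version B (the rewrite author's own statement) =====
-- stated objective: alternative
-- what changed: B stages the work into three passes: it materialises the prefix-sum array of UTF-8 byte lengths, binary-searches (bisect_right by hand) that sorted array for the cutoff index k, then builds the output from k; A instead accumulates lines and bytes in one inline loop with an early return on overflow.
import Mathlib
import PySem

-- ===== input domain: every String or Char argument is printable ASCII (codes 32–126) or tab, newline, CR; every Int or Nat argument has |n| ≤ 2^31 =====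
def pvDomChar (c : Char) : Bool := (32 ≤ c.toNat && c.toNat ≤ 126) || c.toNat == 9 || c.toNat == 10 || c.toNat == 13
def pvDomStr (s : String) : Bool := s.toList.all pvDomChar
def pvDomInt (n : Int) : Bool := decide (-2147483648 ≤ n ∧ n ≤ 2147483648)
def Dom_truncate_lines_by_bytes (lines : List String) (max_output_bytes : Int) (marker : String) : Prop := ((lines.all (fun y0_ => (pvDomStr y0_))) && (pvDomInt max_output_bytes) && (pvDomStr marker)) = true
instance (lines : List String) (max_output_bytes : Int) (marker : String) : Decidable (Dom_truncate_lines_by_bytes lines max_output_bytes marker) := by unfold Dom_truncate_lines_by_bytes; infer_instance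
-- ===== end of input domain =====

-- B replaces A's inline accumulate-and-early-return loop by three stages: a prefix-sum array of the
-- byte lengths, a binary search on it for the cutoff index, and one final build of the output
-- (an alternative decomposition, same O(n) cost; on the ASCII domain len(line.encode("utf-8")) is
-- exactly PySem.Str.len line — 1 byte per char).

-- ===== PORT A =====
-- A's loop: accumulate lines while the running byte total stays within budget; on overflow append the marker and return early.
def pvA_loop (max_output_bytes : Int) (marker : String) : List String → Int → List String → String × Bool
  | [], _, result_lines => (PySem.Str.join "\n" result_lines, false)
  | line :: rest, total_bytes, result_lines =>
    let line_bytes := PySem.Str.len line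
    if total_bytes + line_bytes ≤ max_output_bytes then
      pvA_loop max_output_bytes marker rest (total_bytes + line_bytes) (result_lines ++ [line])
    else
      (PySem.Str.join "\n" (result_lines ++ [marker]), true)

def truncate_lines_by_bytes (lines : List String) (max_output_bytes : Int) (marker : String) : String × Bool :=
  pvA_loop max_output_bytes marker lines 0 []

-- ===== PORT B =====
-- B stage 1: the loop building the prefix-sum list of byte lengths (state = (total, pre_)).
def pvB_prefixLoop : List String → Int → List Int → Int × List Int
  | [], total, pre_ => (total, pre_)
  | line :: rest, total, pre_ =>
    pvB_prefixLoop rest (total + PySem.Str.len line) (pre_ ++ [total + PySem.Str.len line])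

-- B stage 2: the hand-written bisect_right loop; pre_[mid] is always in range when lo < hi ≤ len,
-- so the getD default is never used.
def pvB_bisect (pre_ : List Int) (t : Int) (lo hi : Nat) : Nat :=
  if _h : lo < hi then
    let mid := (lo + hi) / 2
    if pre_.getD mid 0 ≤ t then pvB_bisect pre_ t (mid + 1) hi
    else pvB_bisect pre_ t lo mid
  else lo
termination_by hi - lo
decreasing_by all_goals omega

def truncate_lines_by_bytes_alt (lines : List String) (max_output_bytes : Int) (marker : String) : String × Bool :=
  let pre_ := (pvB_prefixLoop lines 0 []).2
  let k := pvB_bisect pre_ max_output_bytes 0 pre_.length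
  if k = lines.length then (PySem.Str.join "\n" lines, false)
  else (PySem.Str.join "\n" (lines.take k ++ [marker]), true)

-- ===== PRECONDITION & SPEC =====
def Spec_truncate_lines_by_bytes (lines : List String) (max_output_bytes : Int) (marker : String) (out : String × Bool) : Prop := out = truncate_lines_by_bytes_alt lines max_output_bytes marker
instance (lines : List String) (max_output_bytes : Int) (marker : String) (out : String × Bool) : Decidable (Spec_truncate_lines_by_bytes lines max_output_bytes marker out) := by unfold Spec_truncate_lines_by_bytes; infer_instance

-- ===== CLAIM (what is proved, stated in full; the proofs are below) =====
def Claim_equal_truncate_lines_by_bytes : Prop := ∀ (lines : List String) (max_output_bytes : Int) (marker : String), Dom_truncate_lines_by_bytes lines max_output_bytes marker → Spec_truncate_lines_by_bytes lines max_output_bytes marker (truncate_lines_by_bytes lines max_output_bytes marker)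

-- ===== LEMMAS AND PROOFS =====

-- Proof-side helper: the cutoff index as a linear count (the bridge between both ports).
def pvCount (max_output_bytes : Int) : List String → Int → Nat
  | [], _ => 0
  | line :: rest, total =>
    if total + PySem.Str.len line > max_output_bytes then 0
    else 1 + pvCount max_output_bytes rest (total + PySem.Str.len line)

-- Proof-side helper: the prefix-sum list as a direct recursion.
def pvSums : Int → List String → List Int
  | _, [] => []
  | t, line :: rest => (t + PySem.Str.len line) :: pvSums (t + PySem.Str.len line) rest

theorem pvSums_length (t : Int) (ls : List String) : (pvSums t ls).length = ls.length := by
  induction ls generalizing t with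
  | nil => rfl
  | cons l rest ih => simp [pvSums, ih]

theorem pvSums_le_mem (t : Int) (ls : List String) : ∀ x ∈ pvSums t ls, t ≤ x := by
  induction ls generalizing t with
  | nil => simp [pvSums]
  | cons l rest ih =>
    intro x hx
    have hlen : (0 : Int) ≤ PySem.Str.len l := by
      simp [PySem.Str.len]
    rw [pvSums, List.mem_cons] at hx
    rcases hx with h | h
    · omega
    · have := ih (t + PySem.Str.len l) x h
      omega

theorem pvSums_mono (t : Int) (ls : List String) :
    (pvSums t ls).Pairwise (· ≤ ·) := by
  induction ls generalizing t with
  | nil => simp [pvSums]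
  | cons l rest ih =>
    simp only [pvSums, List.pairwise_cons]
    exact ⟨pvSums_le_mem _ _, ih _⟩

theorem pvB_prefixLoop_snd (ls : List String) :
    ∀ (t : Int) (acc : List Int), (pvB_prefixLoop ls t acc).2 = acc ++ pvSums t ls := by
  induction ls with
  | nil => intro t acc; simp [pvB_prefixLoop, pvSums]
  | cons l rest ih => intro t acc; simp [pvB_prefixLoop, pvSums, ih]

-- pvCount characterises membership below the cutoff in the prefix-sum list.
theorem pvCount_char (max : Int) (ls : List String) :
    ∀ (t : Int), pvCount max ls t ≤ ls.length ∧
      ∀ i (hi : i < ls.length),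
        ((pvSums t ls)[i]'(by rw [pvSums_length]; exact hi) ≤ max ↔ i < pvCount max ls t) := by
  induction ls with
  | nil => intro t; simp [pvCount]
  | cons l rest ih =>
    intro t
    obtain ⟨hle, hch⟩ := ih (t + PySem.Str.len l)
    by_cases h : t + PySem.Str.len l > max
    · refine ⟨?_, ?_⟩
      · simp only [pvCount]; rw [if_pos h]; omega
      · intro i hi
        simp only [pvCount]; rw [if_pos h]
        constructor
        · intro hx
          exfalso
          cases i with
          | zero =>
            simp only [pvSums, List.getElem_cons_zero] at hx
            omega
          | succ j =>
            have hj : j < rest.length := by simpa using hi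
            have heq : (pvSums t (l :: rest))[j+1]'(by rw [pvSums_length]; exact hi) =
                (pvSums (t + PySem.Str.len l) rest)[j]'(by rw [pvSums_length]; exact hj) := by
              simp only [pvSums, List.getElem_cons_succ]
            rw [heq] at hx
            have hmem := List.getElem_mem
              (show j < (pvSums (t + PySem.Str.len l) rest).length by
                rw [pvSums_length]; exact hj)
            have := pvSums_le_mem (t + PySem.Str.len l) rest _ hmem
            omega
        · omega
    · refine ⟨?_, ?_⟩
      · simp only [pvCount]; rw [if_neg h]; simp only [List.length_cons]; omega
      · intro i hi
        simp only [pvCount]; rw [if_neg h]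
        cases i with
        | zero => simp only [pvSums, List.getElem_cons_zero]; omega
        | succ j =>
          have hj : j < rest.length := by simpa using hi
          have := hch j hj
          simp only [pvSums, List.getElem_cons_succ]
          omega

-- Correctness of the hand-written bisect_right loop on a monotone list.
theorem pvB_bisect_spec (p : List Int) (t : Int)
    (hmono : ∀ i j (_ : i ≤ j) (hj : j < p.length), p[i]'(by omega) ≤ p[j]) :
    ∀ (n lo hi : Nat), hi - lo ≤ n → lo ≤ hi → hi ≤ p.length →
      (∀ i (hi_ : i < p.length), i < lo → p[i] ≤ t) →
      (∀ i (hi_ : i < p.length), hi ≤ i → t < p[i]) →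
      pvB_bisect p t lo hi ≤ p.length ∧
        ∀ i (hi_ : i < p.length), (p[i] ≤ t ↔ i < pvB_bisect p t lo hi) := by
  intro n
  induction n with
  | zero =>
    intro lo hi hfuel hlohi hhile hlo hhi
    have : lo = hi := by omega
    subst this
    rw [pvB_bisect]
    simp only [lt_irrefl, dite_false]
    exact ⟨by omega, fun i hi_ => ⟨fun h => by
      by_contra hc
      exact absurd h (not_le.mpr (hhi i hi_ (by omega))), fun h => hlo i hi_ h⟩⟩
  | succ n ih =>
    intro lo hi hfuel hlohi hhile hlo hhi
    rw [pvB_bisect]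
    by_cases hlt : lo < hi
    · simp only [hlt, dite_true]
      have hmidlt : (lo + hi) / 2 < p.length := by omega
      have hg : p.getD ((lo + hi) / 2) 0 = p[(lo + hi) / 2] := List.getD_eq_getElem p 0 hmidlt
      by_cases hb : p.getD ((lo + hi) / 2) 0 ≤ t
      · simp only [hb, if_true]
        refine ih ((lo + hi) / 2 + 1) hi (by omega) (by omega) hhile ?_ hhi
        intro i hi_ hil
        calc p[i] ≤ p[(lo + hi) / 2] := hmono i _ (by omega) hmidlt
          _ ≤ t := by rw [← hg]; exact hb
      · simp only [hb, if_false]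
        refine ih lo ((lo + hi) / 2) (by omega) (by omega) (by omega) hlo ?_
        intro i hi_ hmi
        have : p[(lo + hi) / 2] ≤ p[i] := hmono _ i hmi hi_
        rw [hg] at hb
        omega
    · simp only [hlt, dite_false]
      have : lo = hi := by omega
      subst this
      exact ⟨by omega, fun i hi_ => ⟨fun h => by
        by_contra hc
        exact absurd h (not_le.mpr (hhi i hi_ (by omega))), fun h => hlo i hi_ h⟩⟩

-- The two cutoff computations agree.
theorem pvB_bisect_eq_pvCount (lines : List String) (max : Int) :
    pvB_bisect (pvSums 0 lines) max 0 (pvSums 0 lines).length = pvCount max lines 0 := by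
  have hmono : ∀ i j (_ : i ≤ j) (hj : j < (pvSums 0 lines).length),
      (pvSums 0 lines)[i]'(by omega) ≤ (pvSums 0 lines)[j] := by
    intro i j hij hj
    rcases Nat.eq_or_lt_of_le hij with rfl | hlt
    · exact le_refl _
    · exact (List.pairwise_iff_getElem.mp (pvSums_mono 0 lines)) i j (by omega) hj hlt
  obtain ⟨hb_le, hb_ch⟩ := pvB_bisect_spec (pvSums 0 lines) max hmono (pvSums 0 lines).length
    0 (pvSums 0 lines).length (by omega) (by omega) (le_refl _)
    (fun i _ h => absurd h (Nat.not_lt_zero i)) (fun i hi_ h => absurd hi_ (by omega))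
  obtain ⟨hc_le, hc_ch⟩ := pvCount_char max lines 0
  have hplen : (pvSums 0 lines).length = lines.length := pvSums_length 0 lines
  by_contra hne
  rcases Nat.lt_or_ge (pvB_bisect (pvSums 0 lines) max 0 (pvSums 0 lines).length)
      (pvCount max lines 0) with h | h
  · have hlt : pvB_bisect (pvSums 0 lines) max 0 (pvSums 0 lines).length < (pvSums 0 lines).length := by omega
    have h1 := (hc_ch _ (by omega)).mpr h
    have h2 := (hb_ch _ hlt).mp h1
    omega
  · have hlt2 : pvCount max lines 0 < (pvSums 0 lines).length := by omega
    have h1 := (hb_ch _ hlt2).mpr (by omega)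
    have h2 := (hc_ch _ (by omega)).mp h1
    omega

-- A's loop in terms of the linear cutoff count.
theorem pvA_loop_eq (max_output_bytes : Int) (marker : String) :
    ∀ (rest : List String) (total : Int) (acc : List String),
      pvA_loop max_output_bytes marker rest total acc =
        (if pvCount max_output_bytes rest total = rest.length then
            (PySem.Str.join "\n" (acc ++ rest), false)
          else
            (PySem.Str.join "\n" (acc ++ rest.take (pvCount max_output_bytes rest total) ++ [marker]), true)) := by
  intro rest
  induction rest with
  | nil => intro total acc; simp [pvA_loop, pvCount]
  | cons line rest ih =>
    intro total acc
    simp only [pvA_loop, pvCount]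
    by_cases h : total + PySem.Str.len line ≤ max_output_bytes
    · have hng : ¬ total + PySem.Str.len line > max_output_bytes := by omega
      rw [if_pos h, if_neg hng, ih]
      by_cases hk : pvCount max_output_bytes rest (total + PySem.Str.len line) = rest.length
      · rw [if_pos hk, if_pos (by simp only [List.length_cons]; omega)]
        simp
      · rw [if_neg hk, if_neg (by simp only [List.length_cons]; omega)]
        simp [List.take_succ_cons, Nat.add_comm 1]
    · have hg : total + PySem.Str.len line > max_output_bytes := by omega
      rw [if_neg h, if_pos hg, if_neg (by simp)]
      simp

-- ===== VERDICT (by name: the statement is the Claim_ definition above) =====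
theorem truncate_lines_by_bytes_spec : Claim_equal_truncate_lines_by_bytes := by
  intro lines max_output_bytes marker _
  show _ = _
  rw [truncate_lines_by_bytes, pvA_loop_eq]
  simp only [truncate_lines_by_bytes_alt, pvB_prefixLoop_snd, List.nil_append,
    pvB_bisect_eq_pvCount]
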